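-- pv_equiv track=rewrite | github.com/MukundaJ/APS | Problems/Delivery Man/delivery_man.py | delivery_man_optimized
-- ===== SOURCE A (Python) =====
-- def delivery_man_optimized(A, B, X, Y, N):
--     """
--     Find the maximum tip andy and bob can make for N orders.
--     :param A: Tips for Andy for an order.
--     :param B: Tips for Bob for an order.
--     :param X: The maximum # of orders Andy can take.
--     :param Y: The maximum # of orders Bob can take.
--     :param N: The Total # of Orders
--     :return: The maximum tip Andy and Bob can make together.
--     """
--     # Hold max tip.
--     # a_tips, b_tips hold the diff between Andy and Bob's tips.
--     max_tips, a_tips, b_tips = 0, [], []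
--
--     # For all the N orders,
--     # choose the the one who has the maximum tip for that order.
--     # Recording the diffs between the tips and decrement X, Y to record
--     # 'over-utilization' of either Andy or Bob.
--     for a, b, _ in zip(A, B, range(N)):
--         if a > b:
--             a_tips.append(a - b)
--             max_tips += a
--             X -= 1
--         else:
--             b_tips.append(b - a)
--             max_tips += b
--             Y -= 1
--
--     # If Andy was over-utilized,
--     # find the min diff in tips where he contributed and take Bob's
--     # contribution there instead.
--     # This works because when we subtract the diff, the min tip is taken for
--     # order instead.
--     if X < 0:
--         a_tips.sort()
--         for i in range(abs(X)):
--             max_tips -= a_tips[i]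
--
--     # Same for Bob.
--     if Y < 0:
--         b_tips.sort()
--         for i in range(abs(Y)):
--             max_tips -= b_tips[i]
--
--     # return the maximum tip.
--     return max_tips
-- ===== SOURCE B (Python) =====
-- def delivery_man_optimized(A, B, X, Y, N):
--     """Same result via sum of per-order maxima plus quickselect-style selection
--     (iterative three-way partition) of the k smallest surplus differences,
--     instead of sorting and index loops."""
--     pairs = list(zip(A, B, range(N)))
--     a_diffs = [a - b for a, b, _ in pairs if a > b]
--     b_diffs = [b - a for a, b, _ in pairs if a <= b]
--     total = sum(max(a, b) for a, b, _ in pairs)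
--     if len(a_diffs) > X:
--         total -= _sum_k_smallest(len(a_diffs) - X, a_diffs)
--     if len(b_diffs) > Y:
--         total -= _sum_k_smallest(len(b_diffs) - Y, b_diffs)
--     return total
--
--
-- def _sum_k_smallest(k, l):
--     """Sum of the k smallest elements of l (k <= len(l)), by iterative
--     quickselect: three-way partition around a middle pivot, keep only the
--     side that still matters. Expected O(len(l)), no sort."""
--     acc = 0
--     while k > 0 and l:
--         p = l[len(l) // 2]
--         lt = [x for x in l if x < p]
--         eq = [x for x in l if x == p]
--         if k <= len(lt):
--             l = lt
--         elif k <= len(lt) + len(eq):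
--             return acc + sum(lt) + (k - len(lt)) * p
--         else:
--             acc += sum(lt) + sum(eq)
--             k -= len(lt) + len(eq)
--             l = [x for x in l if x > p]
--     return acc
-- ===== Notes on version B (the rewrite author's own statement) =====
-- stated objective: alternative
-- what changed: B replaces A's stateful greedy loop plus two per-side sorts with index loops by a sum of per-order maxima and an iterative quickselect-style three-way-partition selection of the k smallest surplus differences (no sort at all); Pre_ excludes X<0 or Y<0, exactly the inputs where A raises IndexError in its fix-up loop.
import Mathlib
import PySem

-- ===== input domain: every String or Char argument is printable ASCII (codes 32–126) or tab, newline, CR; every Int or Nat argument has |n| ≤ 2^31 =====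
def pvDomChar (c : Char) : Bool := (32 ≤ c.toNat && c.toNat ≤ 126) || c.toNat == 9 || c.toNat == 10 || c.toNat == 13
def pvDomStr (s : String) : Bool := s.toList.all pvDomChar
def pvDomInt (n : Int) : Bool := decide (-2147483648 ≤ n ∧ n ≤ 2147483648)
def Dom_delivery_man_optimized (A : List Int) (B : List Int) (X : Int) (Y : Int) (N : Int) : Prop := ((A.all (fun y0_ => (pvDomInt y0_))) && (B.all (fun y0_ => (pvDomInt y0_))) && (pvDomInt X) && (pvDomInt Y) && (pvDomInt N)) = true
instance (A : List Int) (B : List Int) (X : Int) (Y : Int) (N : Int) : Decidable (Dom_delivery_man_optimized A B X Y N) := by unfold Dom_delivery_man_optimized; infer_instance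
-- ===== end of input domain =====

-- B replaces A's greedy loop with per-side sorts and index loops by a sum of per-order maxima
-- plus an iterative quickselect-style three-way-partition selection of the k smallest surplus
-- differences (objective: alternative — no sort at all).

-- ===== PORT A =====
def delivery_man_optimized (A : List Int) (B : List Int) (X : Int) (Y : Int) (N : Int) : Int :=
  -- zip(A, B, range(N)) truncates to the shortest iterable: exact as (A.zip B).take (max N 0)
  let pairs := (A.zip B).take (max N 0).toNat
  let st := pairs.foldl
    (fun (s : Int × List Int × List Int × Int × Int) p =>
      if p.1 > p.2 then (s.1 + p.1, s.2.1 ++ [p.1 - p.2], s.2.2.1, s.2.2.2.1 - 1, s.2.2.2.2)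
      else (s.1 + p.2, s.2.1, s.2.2.1 ++ [p.2 - p.1], s.2.2.2.1, s.2.2.2.2 - 1))
    (0, [], [], X, Y)
  let m1 :=
    if st.2.2.2.1 < 0 then
      let sa := PySem.List.sorted st.2.1 (fun d => d) false
      (PySem.List.pyRange 0 |st.2.2.2.1| 1).foldl
        (fun acc i => acc - (PySem.List.pyGet? sa i).getD 0) st.1
    else st.1
  if st.2.2.2.2 < 0 then
    let sb := PySem.List.sorted st.2.2.1 (fun d => d) false
    (PySem.List.pyRange 0 |st.2.2.2.2| 1).foldl
      (fun acc i => acc - (PySem.List.pyGet? sb i).getD 0) m1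
  else m1

-- ===== PORT B =====
-- B's while-loop `_sum_k_smallest` ported as structural recursion on a fuel bound
-- (fuel = the list's length suffices: the kept side strictly shrinks each iteration,
-- since the pivot never survives the partition it leaves behind).
def pvSumKSmall : Nat → Int → List Int → Int → Int
  | 0, _, _, acc => acc
  | fuel + 1, k, l, acc =>
    if k ≤ 0 then acc else
    match l with
    | [] => acc
    | x :: t =>
      let whole := x :: t
      let p := whole.getD (whole.length / 2) 0
      let lt := whole.filter (fun y => decide (y < p))
      let eq := whole.filter (fun y => decide (y = p))
      if k ≤ (lt.length : Int) then pvSumKSmall fuel k lt acc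
      else if k ≤ (lt.length : Int) + (eq.length : Int) then
        acc + lt.sum + (k - (lt.length : Int)) * p
      else
        let gt := whole.filter (fun y => decide (p < y))
        pvSumKSmall fuel (k - (lt.length : Int) - (eq.length : Int)) gt (acc + lt.sum + eq.sum)

def delivery_man_optimized_alt (A : List Int) (B : List Int) (X : Int) (Y : Int) (N : Int) : Int :=
  let pairs := (A.zip B).take (max N 0).toNat
  let aD := (pairs.filter (fun p => decide (p.2 < p.1))).map (fun p => p.1 - p.2)
  let bD := (pairs.filter (fun p => decide (p.1 ≤ p.2))).map (fun p => p.2 - p.1)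
  let total := (pairs.map (fun p => max p.1 p.2)).sum
  let total := if (aD.length : Int) > X then total - pvSumKSmall aD.length ((aD.length : Int) - X) aD 0 else total
  if (bD.length : Int) > Y then total - pvSumKSmall bD.length ((bD.length : Int) - Y) bD 0 else total

-- ===== PRECONDITION & SPEC =====
-- Pre_ excludes exactly the inputs on which A raises IndexError: a negative starting cap
-- (X < 0 or Y < 0) always drives its fix-up loop past the end of the corresponding diff list.
def Pre_delivery_man_optimized (A : List Int) (B : List Int) (X : Int) (Y : Int) (N : Int) : Prop :=
  0 ≤ X ∧ 0 ≤ Y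
instance (A : List Int) (B : List Int) (X : Int) (Y : Int) (N : Int) : Decidable (Pre_delivery_man_optimized A B X Y N) := by unfold Pre_delivery_man_optimized; infer_instance

def pvWitness_delivery_man_optimized : List Int × List Int × Int × Int × Int := ([3, 1, 4], [2, 2, 5], 1, 2, 3)

def Spec_delivery_man_optimized (A : List Int) (B : List Int) (X : Int) (Y : Int) (N : Int) (out : Int) : Prop := out = delivery_man_optimized_alt A B X Y N
instance (A : List Int) (B : List Int) (X : Int) (Y : Int) (N : Int) (out : Int) : Decidable (Spec_delivery_man_optimized A B X Y N out) := by unfold Spec_delivery_man_optimized; infer_instance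

-- ===== CLAIM (what is proved, stated in full; the proofs are below) =====
def Claim_equal_delivery_man_optimized : Prop := ∀ (A : List Int) (B : List Int) (X : Int) (Y : Int) (N : Int), Dom_delivery_man_optimized A B X Y N → Pre_delivery_man_optimized A B X Y N → Spec_delivery_man_optimized A B X Y N (delivery_man_optimized A B X Y N)

-- ===== LEMMAS AND PROOFS =====

-- A's greedy loop, characterised: total of the larger tips, the two surplus lists in order,
-- and the caps decremented by the respective pick counts.
theorem pvLoopA (l : List (Int × Int)) (m : Int) (at_ bt : List Int) (x y : Int) :
    l.foldl
      (fun (s : Int × List Int × List Int × Int × Int) p =>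
        if p.1 > p.2 then (s.1 + p.1, s.2.1 ++ [p.1 - p.2], s.2.2.1, s.2.2.2.1 - 1, s.2.2.2.2)
        else (s.1 + p.2, s.2.1, s.2.2.1 ++ [p.2 - p.1], s.2.2.2.1, s.2.2.2.2 - 1))
      (m, at_, bt, x, y)
    = (m + (l.map (fun p => if p.1 > p.2 then p.1 else p.2)).sum,
       at_ ++ (l.filter (fun p => decide (p.2 < p.1))).map (fun p => p.1 - p.2),
       bt ++ (l.filter (fun p => decide (p.1 ≤ p.2))).map (fun p => p.2 - p.1),
       x - ((l.countP (fun p => decide (p.2 < p.1))) : Int),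
       y - ((l.countP (fun p => decide (p.1 ≤ p.2))) : Int)) := by
  induction l generalizing m at_ bt x y with
  | nil => simp
  | cons h t ih =>
    by_cases hc : h.1 > h.2
    · have hc' : h.2 < h.1 := hc
      simp [List.foldl_cons, hc, not_le.mpr hc', ih]
      refine ⟨by ring, by omega⟩
    · have hc' : h.1 ≤ h.2 := not_lt.mp hc
      simp [List.foldl_cons, hc, hc', ih]
      refine ⟨by ring, by omega⟩

-- A's fix-up loop: subtracting l[0], …, l[n-1] is subtracting the sum of the first n elements.
theorem pvSubTake (l : List Int) (n : Nat) (h : n ≤ l.length) (m : Int) :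
    (PySem.List.pyRange 0 (n : Int) 1).foldl
      (fun acc i => acc - (PySem.List.pyGet? l i).getD 0) m
    = m - ((l.take n).sum) := by
  induction n generalizing m with
  | zero => simp [PySem.List.pyRange_one_eq_nil]
  | succ k ih =>
    have hk : (((k + 1 : Nat)) : Int) = (k : Int) + 1 := by push_cast; ring
    rw [hk, PySem.List.pyRange_one_succ_right (by positivity), List.foldl_append,
        ih (by omega)]
    have hk2 : k < l.length := by omega
    simp only [List.foldl_cons, List.foldl_nil, PySem.List.pyGet?_natCast,
      List.getElem?_eq_getElem hk2, Option.getD_some, List.take_add_one,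
      List.sum_append, Option.toList_some, List.sum_cons, List.sum_nil]
    ring

-- A's conditional fix-up equals the unconditional clamped-slice subtraction
theorem pvFix (l : List Int) (X m : Int) (hX : 0 ≤ X) :
    (if X - (l.length : Int) < 0 then
       (PySem.List.pyRange 0 |X - (l.length : Int)| 1).foldl
         (fun acc i => acc - (PySem.List.pyGet? (PySem.List.sorted l (fun d => d) false) i).getD 0) m
     else m)
    = m - ((PySem.List.sorted l (fun d => d) false).take (max ((l.length : Int) - X) 0).toNat).sum := by
  by_cases hc : X - (l.length : Int) < 0
  · rw [if_pos hc, abs_of_neg hc]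
    have hn : -(X - (l.length : Int)) = ((((l.length : Int) - X).toNat : Int)) := by omega
    rw [hn, pvSubTake _ _ (by rw [PySem.List.length_sorted]; omega)]
    have : ((l.length : Int) - X).toNat = (max ((l.length : Int) - X) 0).toNat := by omega
    rw [this]
  · rw [if_neg hc]
    have h0 : (max ((l.length : Int) - X) 0).toNat = 0 := by omega
    simp [h0]

-- three-way partition around p is a permutation of the list
theorem pvPerm3 (l : List Int) (p : Int) :
    (l.filter (fun y => decide (y < p)) ++ l.filter (fun y => decide (y = p))
      ++ l.filter (fun y => decide (p < y))).Perm l := by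
  have h1 := List.filter_append_perm (fun y => decide (y < p)) l
  have h2 := List.filter_append_perm (fun y => decide (y = p))
    (l.filter (fun y => !decide (y < p)))
  rw [List.filter_filter, List.filter_filter] at h2
  have e1 : l.filter (fun y => decide (y = p) && !decide (y < p))
      = l.filter (fun y => decide (y = p)) := by
    apply List.filter_congr
    intro y _
    by_cases h : y = p
    · simp [h]
    · simp [h]
  have e2 : l.filter (fun y => !decide (y = p) && !decide (y < p))
      = l.filter (fun y => decide (p < y)) := by
    apply List.filter_congr
    intro y _
    rcases lt_trichotomy y p with h | h | h
    · simp [h, h.ne, not_lt.mpr h.le]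
    · simp [h]
    · simp [h, h.ne', not_lt.mpr h.le]
  rw [e1, e2] at h2
  rw [List.append_assoc]
  exact (h2.append_left _).trans h1

-- all elements equal p: sum is length * p
theorem pvConstSum (m : List Int) (p : Int) (h : ∀ x ∈ m, x = p) :
    m.sum = (m.length : Int) * p := by
  induction m with
  | nil => simp
  | cons x t ih =>
    have hx := h x (by simp)
    have ht := ih (fun y hy => h y (by simp [hy]))
    simp [hx, ht]
    ring

theorem pvConstPairwise (m : List Int) (p : Int) (h : ∀ x ∈ m, x = p) :
    m.Pairwise (fun a b => a ≤ b) := by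
  induction m with
  | nil => simp
  | cons x t ih =>
    refine List.Pairwise.cons ?_ (ih (fun y hy => h y (by simp [hy])))
    intro y hy
    rw [h x (by simp), h y (by simp [hy])]

-- sorted(l) splits as sorted(lt) ++ eq ++ sorted(gt) around any pivot p
theorem pvSorted3 (l : List Int) (p : Int) :
    PySem.List.sorted l (fun d => d) false
    = PySem.List.sorted (l.filter (fun y => decide (y < p))) (fun d => d) false
      ++ l.filter (fun y => decide (y = p))
      ++ PySem.List.sorted (l.filter (fun y => decide (p < y))) (fun d => d) false := by
  apply PySem.List.sorted_id_eq_of_perm_of_pairwise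
  · have h := (PySem.List.sorted_perm (l.filter (fun y => decide (y < p))) (fun d => d) false).append
      ((List.Perm.refl (l.filter (fun y => decide (y = p)))).append
        (PySem.List.sorted_perm (l.filter (fun y => decide (p < y))) (fun d => d) false))
    rw [List.append_assoc]
    exact h.trans (by rw [← List.append_assoc]; exact pvPerm3 l p)
  · rw [List.append_assoc, List.pairwise_append]
    refine ⟨PySem.List.sorted_pairwise .., ?_, ?_⟩
    · rw [List.pairwise_append]
      refine ⟨pvConstPairwise _ p (fun x hx => by simpa using (List.mem_filter.mp hx).2), ?_, ?_⟩
      · exact (PySem.List.sorted_pairwise ..)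
      · intro a ha b hb
        have ha' : a = p := by simpa using (List.mem_filter.mp ha).2
        have hb' : p < b := by
          have := (PySem.List.mem_sorted ..).mp hb
          simpa using (List.mem_filter.mp this).2
        omega
    · intro a ha b hb
      have ha' : a < p := by
        have := (PySem.List.mem_sorted ..).mp ha
        simpa using (List.mem_filter.mp this).2
      rcases List.mem_append.mp hb with hb | hb
      · have : b = p := by simpa using (List.mem_filter.mp hb).2
        omega
      · have : p < b := by
          have := (PySem.List.mem_sorted ..).mp hb
          simpa using (List.mem_filter.mp this).2
        omega

-- correctness of the quickselect loop: with enough fuel it sums the k smallest elements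
theorem pvSumKEq (fuel : Nat) : ∀ (l : List Int), l.length ≤ fuel → ∀ (k acc : Int), k ≤ (l.length : Int) →
    pvSumKSmall fuel k l acc
    = acc + ((PySem.List.sorted l (fun d => d) false).take (max k 0).toNat).sum := by
  induction fuel with
  | zero =>
    intro l hl k acc hk
    have : l = [] := List.eq_nil_of_length_eq_zero (by omega)
    subst this
    have hs : PySem.List.sorted ([] : List Int) (fun d => d) false = [] := by decide
    simp [pvSumKSmall, hs]
  | succ fuel ih =>
    intro l hl k acc hk
    show (if k ≤ 0 then acc else _) = _
    by_cases hk0 : k ≤ 0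
    · have : (max k 0).toNat = 0 := by omega
      simp [hk0, this]
    · rw [if_neg hk0]
      cases l with
      | nil =>
        have hs : PySem.List.sorted ([] : List Int) (fun d => d) false = [] := by decide
        simp [hs]
      | cons x t =>
        simp only
        set whole := x :: t with hwhole
        set p := whole.getD (whole.length / 2) 0 with hp
        set lt := whole.filter (fun y => decide (y < p)) with hlt
        set eq := whole.filter (fun y => decide (y = p)) with heq
        set gt := whole.filter (fun y => decide (p < y)) with hgt
        have hidxlt : whole.length / 2 < whole.length := by simp [hwhole]; omega
        have hpmem : p ∈ whole := by
          rw [hp, List.getD_eq_getElem _ _ hidxlt]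
          exact List.getElem_mem _
        have hltlen : lt.length < whole.length := by
          rw [hlt, List.length_filter_lt_length_iff_exists]
          exact ⟨p, hpmem, by simp⟩
        have hgtlen : gt.length < whole.length := by
          rw [hgt, List.length_filter_lt_length_iff_exists]
          exact ⟨p, hpmem, by simp⟩
        have hlen3 : whole.length = lt.length + eq.length + gt.length := by
          have h := (pvPerm3 whole p).length_eq
          simp only [List.length_append, ← hlt, ← heq, ← hgt] at h
          omega
        rw [pvSorted3 whole p, ← hlt, ← heq, ← hgt]
        have hkn : ((max k 0).toNat : Int) = k := by omega
        by_cases h1 : k ≤ (lt.length : Int)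
        · rw [if_pos h1]
          have htake : ((PySem.List.sorted lt (fun d => d) false ++ eq
              ++ PySem.List.sorted gt (fun d => d) false).take (max k 0).toNat)
              = (PySem.List.sorted lt (fun d => d) false).take (max k 0).toNat := by
            rw [List.append_assoc, List.take_append_of_le_length]
            rw [PySem.List.length_sorted]; omega
          rw [htake]
          exact ih lt (by omega) k acc h1
        · rw [if_neg h1]
          have hsls : (PySem.List.sorted lt (fun d => d) false).length = lt.length :=
            PySem.List.length_sorted ..
          have heqall : ∀ y ∈ eq, y = p := by
            intro y hy
            rw [heq] at hy
            exact of_decide_eq_true (List.mem_filter.mp hy).2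
          by_cases h2 : k ≤ (lt.length : Int) + (eq.length : Int)
          · rw [if_pos h2]
            rw [List.take_append, List.take_append]
            have h3 : (max k 0).toNat - ((PySem.List.sorted lt (fun d => d) false) ++ eq).length
                = 0 := by simp only [List.length_append, hsls]; omega
            have h4 : (PySem.List.sorted lt (fun d => d) false).take (max k 0).toNat
                = PySem.List.sorted lt (fun d => d) false := List.take_of_length_le (by omega)
            rw [h3, h4]
            have h5 : (eq.take ((max k 0).toNat - (PySem.List.sorted lt (fun d => d) false).length)).sum
                = (((max k 0).toNat - lt.length : Nat) : Int) * p := by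
              rw [pvConstSum _ p (fun y hy => heqall y (List.mem_of_mem_take hy)), hsls,
                List.length_take]
              congr 1
              omega
            simp only [List.take_zero, List.sum_append, List.sum_nil, add_zero, h5]
            rw [(PySem.List.sorted_perm lt (fun d => d) false).sum_eq]
            have : (((max k 0).toNat - lt.length : Nat) : Int) = k - (lt.length : Int) := by omega
            rw [this]; ring
          · rw [if_neg h2]
            rw [List.take_append, List.take_append]
            have h4 : (PySem.List.sorted lt (fun d => d) false).take (max k 0).toNat
                = PySem.List.sorted lt (fun d => d) false := List.take_of_length_le (by omega)
            have h5 : eq.take ((max k 0).toNat - (PySem.List.sorted lt (fun d => d) false).length)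
                = eq := List.take_of_length_le (by rw [hsls]; omega)
            rw [h4, h5]
            have hrec := ih gt (by omega)
              (k - (lt.length : Int) - (eq.length : Int)) (acc + lt.sum + eq.sum) (by omega)
            rw [hrec]
            have hidx : (max k 0).toNat - ((PySem.List.sorted lt (fun d => d) false) ++ eq).length
                = (max (k - (lt.length : Int) - (eq.length : Int)) 0).toNat := by
              simp only [List.length_append, hsls]; omega
            rw [hidx]
            simp only [List.sum_append]
            rw [(PySem.List.sorted_perm lt (fun d => d) false).sum_eq]
            ring

-- B's conditional quickselect subtraction equals the unconditional clamped-slice subtraction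
theorem pvFixB (l : List Int) (X T : Int) (hX : 0 ≤ X) :
    (if (l.length : Int) > X then T - pvSumKSmall l.length ((l.length : Int) - X) l 0 else T)
    = T - ((PySem.List.sorted l (fun d => d) false).take (max ((l.length : Int) - X) 0).toNat).sum := by
  by_cases hc : (l.length : Int) > X
  · rw [if_pos hc, pvSumKEq l.length l le_rfl _ 0 (by omega), zero_add]
  · rw [if_neg hc]
    have h0 : (max ((l.length : Int) - X) 0).toNat = 0 := by omega
    simp [h0]

-- the per-order pick in A is exactly max
theorem pvIfMax (pairs : List (Int × Int)) :
    pairs.map (fun p => if p.1 > p.2 then p.1 else p.2) = pairs.map (fun p => max p.1 p.2) := by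
  apply List.map_congr_left
  intro p _
  by_cases h : p.2 < p.1
  · simp [h, max_eq_left h.le]
  · simp [h, max_eq_right (not_lt.mp h)]

-- ===== VERDICT helper proof =====
theorem delivery_man_optimized_spec : Claim_equal_delivery_man_optimized := by
  intro A B X Y N hdom hpre
  obtain ⟨hX, hY⟩ := hpre
  unfold Spec_delivery_man_optimized delivery_man_optimized delivery_man_optimized_alt
  simp only [pvLoopA, zero_add, List.nil_append]
  set pairs := (A.zip B).take (max N 0).toNat with hpairs
  set aT := (pairs.filter (fun p => decide (p.2 < p.1))).map (fun p => p.1 - p.2) with haT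
  set bT := (pairs.filter (fun p => decide (p.1 ≤ p.2))).map (fun p => p.2 - p.1) with hbT
  have hca : ((pairs.countP (fun p => decide (p.2 < p.1))) : Int) = (aT.length : Int) := by
    simp [haT, List.countP_eq_length_filter]
  have hcb : ((pairs.countP (fun p => decide (p.1 ≤ p.2))) : Int) = (bT.length : Int) := by
    simp [hbT, List.countP_eq_length_filter]
  simp only [hca, hcb]
  rw [pvFix aT _ _ hX, pvFix bT _ _ hY, pvFixB aT _ _ hX, pvFixB bT _ _ hY, pvIfMax]
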